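-- pv_equiv track=rewrite | github.com/Czaki/napari_dashboard | src/napari_dashboard/big_query_update.py | parse_distro
-- ===== SOURCE A (Python) =====
-- def parse_distro(distro: str):
--     """Parse the distro string to get the name and version
--
--     Helper function for load_from_czi_file function
--
--     Parameters
--     ----------
--     distro: str
--         The distro string to parse. For example:
--         Ubuntu22.04jammy
--
--     Returns
--     -------
--     Tuple[str, str]
--         The distro name and version
--     """
--     for i in range(len(distro)):
--         if distro[i].isdigit():
--             distro_name = distro[:i]
--             for j in range(i, len(distro)):
--                 if distro[j].isalpha():
--                     distro_version = distro[i:j]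
--                     return distro_name, distro_version
--
--     raise ValueError("No version found in distro string")
-- ===== SOURCE B (Python) =====
-- def parse_distro(distro: str):
--     """Parse the distro string to get the name and version.
--
--     Single left-to-right pass with a state machine: accumulate the name until
--     the first digit flips the state, then accumulate the version until a
--     letter ends it.
--     """
--     name, version = [], []
--     in_version = False
--     for c in distro:
--         if in_version:
--             if c.isalpha():
--                 return "".join(name), "".join(version)
--             version.append(c)
--         elif c.isdigit():
--             in_version = True
--             version.append(c)
--         else:
--             name.append(c)
--     raise ValueError("No version found in distro string")
-- ===== Notes on version B (the rewrite author's own statement) =====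
-- stated objective: alternative
-- what changed: Replaces A's nested index-scans and slicing (find first digit index, then rescan from it for a letter, then slice twice) with a single left-to-right pass: a two-state machine that accumulates name characters until the first digit, then version characters until a letter, never indexing or slicing.
import Mathlib
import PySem

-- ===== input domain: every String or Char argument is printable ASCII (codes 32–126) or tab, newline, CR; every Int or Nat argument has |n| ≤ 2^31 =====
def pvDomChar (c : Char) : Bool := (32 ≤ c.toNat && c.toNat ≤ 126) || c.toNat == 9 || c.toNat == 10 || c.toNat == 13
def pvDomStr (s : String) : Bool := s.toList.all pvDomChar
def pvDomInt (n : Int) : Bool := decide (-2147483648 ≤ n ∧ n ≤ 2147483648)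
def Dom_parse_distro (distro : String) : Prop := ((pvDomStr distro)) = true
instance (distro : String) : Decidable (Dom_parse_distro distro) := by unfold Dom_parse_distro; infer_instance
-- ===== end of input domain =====

-- B replaces A's nested index-scans and slicing with a single-pass two-state accumulator machine (same values; A's ValueError reproduced via Pre_).


-- ===== PORT A =====
-- inner loop: for j in range(i, len(distro)): if distro[j].isalpha(): return the slices
def pvAInner (L : List Char) (j : Nat) : Option Nat :=
  if h : j < L.length then
    if PySem.Chars.isalpha L[j] then some j else pvAInner L (j + 1)
  else none
termination_by L.length - j

-- outer loop: for i in range(len(distro)): if distro[i].isdigit(): …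
def pvAOuter (L : List Char) (i : Nat) : Option (String × String) :=
  if h : i < L.length then
    if PySem.Chars.isdigit L[i] then
      match pvAInner L i with
      | some j =>
          some (String.mk (PySem.List.slice L none (some (i : Int))),       -- distro[:i]
                String.mk (PySem.List.slice L (some (i : Int)) (some (j : Int))))  -- distro[i:j]
      | none => pvAOuter L (i + 1)
    else pvAOuter L (i + 1)
  else none
termination_by L.length - i

def parse_distro (distro : String) : String × String :=
  match pvAOuter distro.toList 0 with
  | some r => r
  | none => ("", "")   -- Python raises ValueError here; Pre_parse_distro excludes these inputs

-- ===== PORT B =====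
-- single pass: state false = accumulating the name, state true = accumulating the version
def pvBLoop (s : List Char) (inVersion : Bool) (name version : List Char) :
    Option (String × String) :=
  match s with
  | [] => none
  | c :: rest =>
      if inVersion then
        if PySem.Chars.isalpha c then some (String.mk name, String.mk version)
        else pvBLoop rest true name (version ++ [c])
      else
        if PySem.Chars.isdigit c then pvBLoop rest true name (version ++ [c])
        else pvBLoop rest false (name ++ [c]) version

def parse_distro_alt (distro : String) : String × String :=
  match pvBLoop distro.toList false [] [] with
  | some r => r
  | none => ("", "")   -- Python raises ValueError here; Pre_parse_distro excludes these inputs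

-- ===== PRECONDITION & SPEC =====
-- Pre_ excludes exactly the inputs where A raises ValueError: strings with no letter at or
-- after the first digit (in particular strings with no digit at all).
def Pre_parse_distro (distro : String) : Prop :=
  ((distro.toList.dropWhile (fun c => !PySem.Chars.isdigit c)).any PySem.Chars.isalpha) = true
instance (distro : String) : Decidable (Pre_parse_distro distro) := by unfold Pre_parse_distro; infer_instance

def pvWitness_parse_distro : String := "Ubuntu22.04jammy"

def Spec_parse_distro (distro : String) (out : String × String) : Prop := out = parse_distro_alt distro
instance (distro : String) (out : String × String) : Decidable (Spec_parse_distro distro out) := by unfold Spec_parse_distro; infer_instance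

-- ===== CLAIM (what is proved, stated in full; the proofs are below) =====
def Claim_equal_parse_distro : Prop := ∀ (distro : String), Dom_parse_distro distro → Pre_parse_distro distro → Spec_parse_distro distro (parse_distro distro)

-- ===== LEMMAS AND PROOFS =====

theorem digit_not_alpha (c : Char) (h : PySem.Chars.isdigit c = true) :
    PySem.Chars.isalpha c = false := by
  simp [PySem.Chars.isdigit, PySem.Chars.isalpha, PySem.Chars.isupper, PySem.Chars.islower,
        Char.le_def, UInt32.le_iff_toNat_le] at *
  omega

theorem pvAInner_spec (L : List Char) (j : Nat) :
    pvAInner L j =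
      if (L.drop j).any PySem.Chars.isalpha then
        some (j + ((L.drop j).takeWhile (fun c => !PySem.Chars.isalpha c)).length)
      else none := by
  fun_induction pvAInner L j with
  | case1 j h ha =>
      have hd := List.drop_eq_getElem_cons h
      rw [hd, List.any_cons, List.takeWhile_cons]
      simp [ha]
  | case2 j h ha ih =>
      rw [List.drop_eq_getElem_cons h]
      simp only [List.any_cons, ha, Bool.false_or, List.takeWhile_cons, Bool.not_false,
        if_pos, ih]
      split <;> simp <;> omega
  | case3 j h =>
      rw [List.drop_eq_nil_of_le (by omega)]
      simp

theorem pvAOuter_spec (L : List Char) (i : Nat) :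
    pvAOuter L i =
      if ((L.drop i).dropWhile (fun c => !PySem.Chars.isdigit c)).any PySem.Chars.isalpha then
        (let i0 := i + ((L.drop i).takeWhile (fun c => !PySem.Chars.isdigit c)).length
         let t := (((L.drop i).dropWhile (fun c => !PySem.Chars.isdigit c)).takeWhile
                     (fun c => !PySem.Chars.isalpha c)).length
         some (String.mk (L.take i0), String.mk ((L.drop i0).take t)))
      else none := by
  fun_induction pvAOuter L i with
  | case1 i h hd j hj =>
      rw [pvAInner_spec] at hj
      have hd' := List.drop_eq_getElem_cons h
      have hdw : (L.drop i).dropWhile (fun c => !PySem.Chars.isdigit c) = L.drop i := by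
        rw [hd', List.dropWhile_cons]
        simp [hd]
      have htw : (L.drop i).takeWhile (fun c => !PySem.Chars.isdigit c) = [] := by
        rw [hd', List.takeWhile_cons]
        simp [hd]
      by_cases ha : (L.drop i).any PySem.Chars.isalpha = true
      · rw [if_pos ha] at hj
        injection hj with hj
        subst hj
        simp only [hdw, ha, if_pos, htw, List.length_nil, Nat.add_zero]
        rw [PySem.List.slice_to_natCast, PySem.List.slice_natCast]
        simp
      · simp [ha] at hj
  | case2 i h hd hj ih =>
      rw [pvAInner_spec] at hj
      have ha : (L.drop i).any PySem.Chars.isalpha = false := by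
        by_cases ha : (L.drop i).any PySem.Chars.isalpha = true
        · simp [ha] at hj
        · simpa using ha
      have hd' := List.drop_eq_getElem_cons h
      have hdw : (L.drop i).dropWhile (fun c => !PySem.Chars.isdigit c) = L.drop i := by
        rw [hd', List.dropWhile_cons]
        simp [hd]
      have ha1 : ((L.drop (i+1)).dropWhile (fun c => !PySem.Chars.isdigit c)).any
          PySem.Chars.isalpha = false := by
        rw [List.any_eq_false] at ha ⊢
        intro x hx
        have hx1 : x ∈ L.drop (i+1) := (List.dropWhile_sublist _).subset hx
        have hx0 : x ∈ L.drop i := by rw [hd']; exact List.mem_cons_of_mem _ hx1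
        exact ha x hx0
      rw [ih, if_neg (by simp [ha1]), hdw, if_neg (by simp [ha])]
  | case3 i h hd ih =>
      have hd' := List.drop_eq_getElem_cons h
      have hdw : (L.drop i).dropWhile (fun c => !PySem.Chars.isdigit c)
          = (L.drop (i+1)).dropWhile (fun c => !PySem.Chars.isdigit c) := by
        rw [hd', List.dropWhile_cons]
        simp [hd]
      have htw : (L.drop i).takeWhile (fun c => !PySem.Chars.isdigit c)
          = L[i] :: (L.drop (i+1)).takeWhile (fun c => !PySem.Chars.isdigit c) := by
        rw [hd', List.takeWhile_cons]
        simp [hd]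
      rw [ih, hdw, htw]
      split
      · simp only [List.length_cons]
        have : i + (((L.drop (i+1)).takeWhile (fun c => !PySem.Chars.isdigit c)).length + 1)
            = i + 1 + ((L.drop (i+1)).takeWhile (fun c => !PySem.Chars.isdigit c)).length := by
          omega
        rw [this]
      · rfl
  | case4 i h =>
      rw [List.drop_eq_nil_of_le (by omega)]
      simp

theorem pvBLoop_true (M name v : List Char) :
    pvBLoop M true name v =
      if M.any PySem.Chars.isalpha then
        some (String.mk name, String.mk (v ++ M.takeWhile (fun c => !PySem.Chars.isalpha c)))
      else none := by
  induction M generalizing v with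
  | nil => simp [pvBLoop]
  | cons c rest ih =>
      by_cases hc : PySem.Chars.isalpha c = true
      · simp [pvBLoop, hc]
      · simp [pvBLoop, hc, ih]

theorem pvBLoop_false (L name v : List Char) :
    pvBLoop L false name v =
      match L.dropWhile (fun c => !PySem.Chars.isdigit c) with
      | [] => none
      | d :: suf =>
          pvBLoop suf true (name ++ L.takeWhile (fun c => !PySem.Chars.isdigit c)) (v ++ [d]) := by
  induction L generalizing name with
  | nil => simp [pvBLoop]
  | cons c rest ih =>
      by_cases hc : PySem.Chars.isdigit c = true
      · simp [pvBLoop, hc]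
      · simp only [pvBLoop, hc, Bool.false_eq_true, ih,
          List.dropWhile_cons, List.takeWhile_cons]
        simp

-- ===== VERDICT (by name: the statement is the Claim_ definition above) =====
theorem parse_distro_spec : Claim_equal_parse_distro := by
  unfold Claim_equal_parse_distro
  intro distro _ hpre
  unfold Spec_parse_distro parse_distro parse_distro_alt Pre_parse_distro at *
  set L := distro.toList with hL
  set tw := L.takeWhile (fun c => !PySem.Chars.isdigit c) with htw
  set dw := L.dropWhile (fun c => !PySem.Chars.isdigit c) with hdw
  have htake : L.take tw.length = tw := (List.prefix_iff_eq_take.mp (List.takeWhile_prefix _)).symm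
  have hdrop : L.drop tw.length = dw := by
    conv_lhs => rw [(List.takeWhile_append_dropWhile (p := fun c => !PySem.Chars.isdigit c)
      (l := L)).symm]
    exact List.drop_left
  obtain ⟨d, suf, hds⟩ : ∃ d suf, dw = d :: suf := by
    cases h : dw with
    | nil => rw [h] at hpre; simp at hpre
    | cons d suf => exact ⟨d, suf, rfl⟩
  have hdd : PySem.Chars.isdigit d = true := by
    have := List.head_dropWhile_not (p := fun c => !PySem.Chars.isdigit c) (l := L)
    rw [← hdw, hds] at this
    simpa using this (by simp)
  have hda : PySem.Chars.isalpha d = false := digit_not_alpha d hdd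
  have hsuf : suf.any PySem.Chars.isalpha = true := by
    rw [hds] at hpre
    simpa [hda] using hpre
  rw [pvAOuter_spec, pvBLoop_false]
  simp only [List.drop_zero, Nat.zero_add, ← htw, ← hdw, hds]
  rw [pvBLoop_true, if_pos hsuf, htake, hdrop, hds]
  have htwa : (d :: suf).takeWhile (fun c => !PySem.Chars.isalpha c)
      = d :: suf.takeWhile (fun c => !PySem.Chars.isalpha c) := by
    rw [List.takeWhile_cons]
    simp [hda]
  rw [htwa]
  simp only [List.length_cons, List.take_succ_cons, List.nil_append]
  rw [(List.prefix_iff_eq_take.mp (List.takeWhile_prefix (l := suf) (fun c => !PySem.Chars.isalpha c))).symm]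
  have hcond : (d :: suf).any PySem.Chars.isalpha = true := by simp [hsuf]
  rw [if_pos hcond]
  simp
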